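-- pv_equiv track=rewrite | github.com/thavelin/App-Builder | backend/app/services/execution.py | find_entrypoint_in_file_paths
-- ===== SOURCE A (Python) =====
-- from typing import Dict, Any, List, Optional
--
-- ENTRYPOINT_CANDIDATES = ["app.py", "main.py", "index.js", "index.html"]
--
-- def find_entrypoint_in_file_paths(file_paths: List[str], require_root: bool = False) -> Optional[str]:
--     """
--     Find entry point by searching through file paths (for validation before extraction).
--
--     Args:
--         file_paths: List of file paths (as strings) to search
--         require_root: If True, only check for root-level entrypoints (default: False, searches recursively)
--
--     Returns:
--         First matching file path, or None if not found
--     """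
--     for candidate in ENTRYPOINT_CANDIDATES:
--         for file_path in file_paths:
--             if require_root:
--                 # Only check root-level files (no path separators)
--                 if file_path == candidate or file_path.replace("\\", "/") == candidate:
--                     return file_path
--             else:
--                 # Check if the path ends with the candidate filename (recursive)
--                 if file_path.endswith(candidate) or f"/{candidate}" in file_path or f"\\{candidate}" in file_path:
--                     return file_path
--     return None
-- ===== SOURCE B (Python) =====
-- ENTRYPOINT_CANDIDATES = ["app.py", "main.py", "index.js", "index.html"]
--
-- def _matches(path, candidate, require_root):
--     if require_root:
--         return path == candidate or path.replace("\\", "/") == candidate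
--     return path.endswith(candidate) or f"/{candidate}" in path or f"\\{candidate}" in path
--
-- def find_entrypoint_in_file_paths(file_paths, require_root=False):
--     # Single path-major pass: keep the best (lowest) candidate rank seen so far.
--     best_path = None
--     best_rank = len(ENTRYPOINT_CANDIDATES)
--     for path in file_paths:
--         for i, candidate in enumerate(ENTRYPOINT_CANDIDATES[:best_rank]):
--             if _matches(path, candidate, require_root):
--                 best_rank, best_path = i, path
--                 break
--     return best_path
-- ===== Notes on version B (the rewrite author's own statement) =====
-- stated objective: alternative
-- what changed: Replaced A's candidate-major nested loop (rescanning all file paths for each candidate) by a single path-major pass that tracks the best candidate rank seen so far and only tests candidates strictly better than it.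
import Mathlib
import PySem

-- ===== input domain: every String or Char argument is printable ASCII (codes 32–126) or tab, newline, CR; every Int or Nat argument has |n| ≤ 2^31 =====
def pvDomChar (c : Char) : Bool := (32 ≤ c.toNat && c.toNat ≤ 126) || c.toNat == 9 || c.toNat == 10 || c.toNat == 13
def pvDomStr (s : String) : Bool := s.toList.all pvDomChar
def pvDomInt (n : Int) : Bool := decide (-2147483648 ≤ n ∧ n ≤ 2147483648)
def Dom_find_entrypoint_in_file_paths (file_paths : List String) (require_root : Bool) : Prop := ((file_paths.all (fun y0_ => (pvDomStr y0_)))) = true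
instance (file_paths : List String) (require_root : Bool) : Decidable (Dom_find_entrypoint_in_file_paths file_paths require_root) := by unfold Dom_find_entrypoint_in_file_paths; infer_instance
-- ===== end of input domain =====

-- B replaces A's candidate-major nested loop by a single path-major pass tracking the best candidate rank (alternative decomposition, same worst-case cost).


-- ===== PORT A =====
def ENTRYPOINT_CANDIDATES : List String := ["app.py", "main.py", "index.js", "index.html"]

-- A's inline match test (the body of its inner 'if')
def pvPredA (file_path candidate : String) (require_root : Bool) : Bool :=
  if require_root then
    file_path == candidate || PySem.Str.replace file_path "\\" "/" == candidate
  else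
    PySem.Str.endswith file_path candidate || PySem.Str.isIn ("/" ++ candidate) file_path
      || PySem.Str.isIn ("\\" ++ candidate) file_path

-- A's outer loop over candidates; the inner loop with early return is List.find?
def pvLoopA (candidates : List String) (file_paths : List String) (require_root : Bool) : Option String :=
  match candidates with
  | [] => none
  | c :: cs =>
    match file_paths.find? (fun p => pvPredA p c require_root) with
    | some p => some p
    | none => pvLoopA cs file_paths require_root

def find_entrypoint_in_file_paths (file_paths : List String) (require_root : Bool) : Option String :=
  pvLoopA ENTRYPOINT_CANDIDATES file_paths require_root

-- ===== PORT B =====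
-- Source B's _matches helper
def pvMatchB (path candidate : String) (require_root : Bool) : Bool :=
  if require_root then
    path == candidate || PySem.Str.replace path "\\" "/" == candidate
  else
    PySem.Str.endswith path candidate || PySem.Str.isIn ("/" ++ candidate) path
      || PySem.Str.isIn ("\\" ++ candidate) path

-- Source B's loop body: first matching index among the candidates better than the current best rank
def pvStepB (require_root : Bool) (st : Nat × Option String) (path : String) : Nat × Option String :=
  match (ENTRYPOINT_CANDIDATES.take st.1).findIdx? (fun c => pvMatchB path c require_root) with
  | some i => (i, some path)
  | none => st

def find_entrypoint_in_file_paths_alt (file_paths : List String) (require_root : Bool) : Option String :=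
  (file_paths.foldl (pvStepB require_root) (ENTRYPOINT_CANDIDATES.length, none)).2

-- ===== PRECONDITION & SPEC =====
def Spec_find_entrypoint_in_file_paths (file_paths : List String) (require_root : Bool) (out : Option String) : Prop := out = find_entrypoint_in_file_paths_alt file_paths require_root
instance (file_paths : List String) (require_root : Bool) (out : Option String) : Decidable (Spec_find_entrypoint_in_file_paths file_paths require_root out) := by unfold Spec_find_entrypoint_in_file_paths; infer_instance

-- ===== CLAIM (what is proved, stated in full; the proofs are below) =====
def Claim_equal_find_entrypoint_in_file_paths : Prop := ∀ (file_paths : List String) (require_root : Bool), Dom_find_entrypoint_in_file_paths file_paths require_root → Spec_find_entrypoint_in_file_paths file_paths require_root (find_entrypoint_in_file_paths file_paths require_root)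

-- ===== LEMMAS AND PROOFS =====

-- Proof-side characterisation of B's state after processing fps, for an arbitrary candidate list:
-- (index of first candidate with a match in fps — cs.length if none — , A's answer on fps).
def gState (rr : Bool) (cs fps : List String) : Nat × Option String :=
  match cs with
  | [] => (0, none)
  | c :: cs' =>
    match fps.find? (fun p => pvPredA p c rr) with
    | some q => (0, some q)
    | none => ((gState rr cs' fps).1 + 1, (gState rr cs' fps).2)

-- generic form of pvStepB, over an arbitrary candidate list
def gStep (rr : Bool) (cs : List String) (st : Nat × Option String) (p : String) : Nat × Option String :=
  match (cs.take st.1).findIdx? (fun c => pvPredA p c rr) with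
  | some i => (i, some p)
  | none => st

theorem pvMatchB_eq (p c : String) (rr : Bool) : pvMatchB p c rr = pvPredA p c rr := rfl

theorem pvStepB_eq (rr : Bool) : pvStepB rr = gStep rr ENTRYPOINT_CANDIDATES := by
  funext st p
  simp [pvStepB, gStep, pvMatchB_eq]

theorem gState_nil (rr : Bool) (cs : List String) : gState rr cs [] = (cs.length, none) := by
  induction cs with
  | nil => simp [gState]
  | cons c cs ih => simp [gState, ih]

theorem gState_snd (rr : Bool) (cs fps : List String) :
    (gState rr cs fps).2 = pvLoopA cs fps rr := by
  induction cs with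
  | nil => simp [gState, pvLoopA]
  | cons c cs ih =>
    simp only [gState, pvLoopA]
    cases fps.find? (fun p => pvPredA p c rr) with
    | none => simpa using ih
    | some q => rfl

theorem gStep_gState (rr : Bool) (cs fps : List String) (p : String) :
    gStep rr cs (gState rr cs fps) p = gState rr cs (fps ++ [p]) := by
  induction cs with
  | nil => simp [gStep, gState]
  | cons c cs ih =>
    simp only [gState, List.find?_append]
    cases hf : fps.find? (fun q => pvPredA q c rr) with
    | some q =>
      simp [gStep]
    | none =>
      simp only [Option.none_or, List.find?]
      by_cases hp : pvPredA p c rr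
      · simp [gStep, List.take_succ_cons, List.findIdx?_cons, hp]
      · simp only [hp]
        have := ih
        simp only [gStep] at this ⊢
        simp only [List.take_succ_cons, List.findIdx?_cons, hp, Bool.false_eq_true, if_false]
        cases hidx : (cs.take (gState rr cs fps).1).findIdx? (fun c => pvPredA p c rr) with
        | some i =>
          rw [hidx] at this
          simp only [Option.map_some]
          simp [← this]
        | none =>
          rw [hidx] at this
          simp [← this]

theorem foldl_gState (rr : Bool) (cs : List String) :
    ∀ (rest done : List String),
      rest.foldl (gStep rr cs) (gState rr cs done) = gState rr cs (done ++ rest) := by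
  intro rest
  induction rest with
  | nil => intro done; simp
  | cons p rest ih =>
    intro done
    have h1 : gStep rr cs (gState rr cs done) p = gState rr cs (done ++ [p]) :=
      gStep_gState rr cs done p
    calc (p :: rest).foldl (gStep rr cs) (gState rr cs done)
        = rest.foldl (gStep rr cs) (gState rr cs (done ++ [p])) := by
          simp [List.foldl_cons, h1]
      _ = gState rr cs ((done ++ [p]) ++ rest) := ih (done ++ [p])
      _ = gState rr cs (done ++ (p :: rest)) := by simp

-- ===== VERDICT (by name: the statement is the Claim_ definition above) =====
theorem find_entrypoint_in_file_paths_spec : Claim_equal_find_entrypoint_in_file_paths := by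
  intro fps rr _
  show find_entrypoint_in_file_paths fps rr = find_entrypoint_in_file_paths_alt fps rr
  unfold find_entrypoint_in_file_paths find_entrypoint_in_file_paths_alt
  rw [pvStepB_eq]
  have hinit : (ENTRYPOINT_CANDIDATES.length, (none : Option String))
      = gState rr ENTRYPOINT_CANDIDATES [] := (gState_nil rr _).symm
  rw [hinit, foldl_gState rr ENTRYPOINT_CANDIDATES fps []]
  simpa using (gState_snd rr ENTRYPOINT_CANDIDATES fps).symm
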